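-- pv_equiv track=rewrite | github.com/mbv06/advent_of_code_2025 | day06/part2.py | calculate_grand_total
-- ===== SOURCE A (Python) =====
-- from functools import reduce
-- import operator
--
-- OPS = {'+': operator.add, '*': operator.mul, }
--
-- def fixed_data(lines):
--     # Check length of all strings and fix if IDE removed trailing space
--     length = max(map(len, lines))
--     *data, operations = (l.ljust(length) for l in lines)
--     return data, operations, length
--
-- def calculate_grand_total(worksheet):
--     data, operations, length = fixed_data(worksheet.splitlines())
--     operands = []
--     res = 0
--
--     for i in range(length)[::-1]:
--         if num := "".join(l[i] for l in data).strip():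
--             operands.append(int(num))
--             if ops := operations[i].strip():
--                 op = OPS[ops]
--                 res += reduce(op, operands)
--                 operands = []
--
--     return res
-- ===== SOURCE B (Python) =====
-- from functools import reduce
-- import operator
--
-- OPS = {'+': operator.add, '*': operator.mul, }
--
-- def calculate_grand_total(worksheet):
--     # staged/index-based: locate the operator columns first, then evaluate each
--     # [operator column, next operator column) segment independently and sum
--     lines = worksheet.splitlines()
--     length = max(map(len, lines))
--     rows = [l.ljust(length) for l in lines]
--     data, operations = rows[:-1], rows[-1]
--
--     def number_at(j):
--         s = "".join(r[j] for r in data).strip()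
--         return int(s) if s else None
--
--     # an operator marker only counts when its column carries a number
--     op_cols = [j for j in range(length)
--                if operations[j].strip() and number_at(j) is not None]
--
--     total = 0
--     for p, q in zip(op_cols, op_cols[1:] + [length]):
--         nums = [n for j in range(p, q) if (n := number_at(j)) is not None]
--         total += reduce(OPS[operations[p].strip()], nums)
--     return total
-- ===== Notes on version B (the rewrite author's own statement) =====
-- stated objective: alternative
-- what changed: A streams the columns right-to-left with an accumulator (collect operands, reduce on each operator column); B is staged and index-based: it first computes the list of operator-column positions, then evaluates each [operator, next operator) segment independently by gathering and reducing its numbers, and sums the segment values; numbers in columns left of the first operator belong to no segment, exactly as in A, where they are collected but never reduced.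
import Mathlib
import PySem

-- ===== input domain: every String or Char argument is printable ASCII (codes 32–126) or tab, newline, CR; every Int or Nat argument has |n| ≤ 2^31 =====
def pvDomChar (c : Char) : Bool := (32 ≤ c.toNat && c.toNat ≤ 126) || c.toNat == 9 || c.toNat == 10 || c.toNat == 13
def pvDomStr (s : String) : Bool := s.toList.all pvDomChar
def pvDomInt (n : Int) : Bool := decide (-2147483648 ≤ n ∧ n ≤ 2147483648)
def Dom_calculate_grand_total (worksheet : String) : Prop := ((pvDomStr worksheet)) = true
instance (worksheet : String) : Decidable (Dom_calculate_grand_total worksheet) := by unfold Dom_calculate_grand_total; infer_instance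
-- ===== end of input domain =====

-- B replaces A's right-to-left streaming accumulator by a staged, index-based plan:
-- first the operator-column positions, then each [operator, next operator) segment
-- evaluated independently and summed (same cost; objective: alternative algorithm).

-- ===== PORT A =====
-- shared small helpers (both Pythons use the same module constants / str.ljust / functools.reduce)
def pyLjust (cs : List Char) (n : Nat) : List Char := cs ++ List.replicate (n - cs.length) ' '

-- OPS = {'+': operator.add, '*': operator.mul}
def opsDict : PySem.Dict String (Int → Int → Int) := ⟨[("+", (· + ·)), ("*", (· * ·))]⟩

-- functools.reduce f xs (no initial value): none = TypeError on empty list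
def pyReduce (f : Int → Int → Int) : List Int → Option Int
  | [] => none
  | h :: t => some (t.foldl f h)

-- body of A's loop for one index i; none = the Python raises (IndexError/ValueError/KeyError/TypeError)
def calcA_step (data : List (List Char)) (operations : List Char)
    (st : List Int × Int) (i : Int) : Option (List Int × Int) :=
  match data.mapM (fun l => PySem.List.pyGet? l i) with           -- (l[i] for l in data)
  | none => none
  | some chars =>
    let num := PySem.Chars.strip chars                            -- "".join(...).strip()
    if num = [] then some st
    else
      match PySem.Int.ofChars? num with                           -- int(num)
      | none => none
      | some n =>
        let operands := st.1 ++ [n]                               -- operands.append(int(num))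
        match PySem.List.pyGet? operations i with                 -- operations[i]
        | none => none
        | some oc =>
          let ops := PySem.Chars.strip [oc]                       -- .strip()
          if ops = [] then some (operands, st.2)
          else
            match PySem.Dict.get? opsDict (String.ofList ops) with    -- OPS[ops]
            | none => none
            | some f =>
              match pyReduce f operands with                      -- reduce(op, operands)
              | none => none
              | some r => some ([], st.2 + r)

-- A: right-to-left scan over range(length)[::-1]; none = the Python raises
def calcA (w : String) : Option Int :=
  match PySem.List.max? (((PySem.Str.splitlines w).map String.toList).map List.length) (fun n => n) with  -- max(map(len, lines)); none on [] = ValueError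
  | none => none
  | some length =>
    match (((PySem.Str.splitlines w).map String.toList).map (fun l => pyLjust l length)).getLast? with  -- *data, operations of the ljust-ed lines
    | none => none
    | some operations =>
      match PySem.List.slice? (PySem.List.pyRange 0 (length : Int) 1) none none (-1) with  -- range(length)[::-1]
      | none => none
      | some idxs =>
        (idxs.foldl (fun o i => o.bind (fun st => calcA_step
            ((((PySem.Str.splitlines w).map String.toList).map (fun l => pyLjust l length)).dropLast)
            operations st i))
          (some ([], 0))).map (·.2)

def calculate_grand_total (worksheet : String) : Int := (calcA worksheet).getD 0

-- ===== PORT B =====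
-- number_at(j): None if the column's data part is blank; none (outer) = ValueError/IndexError
def numAtB (data : List (List Char)) (j : Int) : Option (Option Int) :=
  match data.mapM (fun r => PySem.List.pyGet? r j) with           -- (r[j] for r in data)
  | none => none
  | some chars =>
    let s := PySem.Chars.strip chars                              -- "".join(...).strip()
    if s = [] then some none                                      -- return None
    else (PySem.Int.ofChars? s).map some                          -- return int(s)

-- op_cols = [j for j in range(length) if operations[j].strip() and number_at(j) is not None]
def opColsB (data : List (List Char)) (ops : List Char) (length : Int) : Option (List Int) :=
  (PySem.List.pyRange 0 length 1).foldl
    (fun o j => o.bind (fun acc =>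
      match PySem.List.pyGet? ops j with
      | none => none
      | some c =>
        if PySem.Chars.strip [c] = [] then some acc
        else match numAtB data j with
          | none => none
          | some none => some acc
          | some (some _) => some (acc ++ [j])))
    (some [])

-- one segment: gather its numbers, look the operator up, reduce
def groupB (data : List (List Char)) (ops : List Char) (pq : Int × Int) : Option Int :=
  match (PySem.List.pyRange pq.1 pq.2 1).foldl
      (fun o j => o.bind (fun acc =>
        match numAtB data j with
        | none => none
        | some none => some acc
        | some (some n) => some (acc ++ [n]))) (some []) with     -- nums = [...]
  | none => none
  | some nums =>
    match PySem.List.pyGet? ops pq.1 with                         -- operations[p]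
    | none => none
    | some c =>
      match PySem.Dict.get? opsDict (String.ofList (PySem.Chars.strip [c])) with  -- OPS[...]
      | none => none
      | some f => pyReduce f nums                                 -- reduce(..., nums)

-- B: staged — operator positions first, then one pass over zip(op_cols, op_cols[1:] + [length])
def calcB (w : String) : Option Int :=
  match PySem.List.max? (((PySem.Str.splitlines w).map String.toList).map List.length) (fun n => n) with
  | none => none
  | some length =>
    let rows := ((PySem.Str.splitlines w).map String.toList).map (fun l => pyLjust l length)
    match rows.getLast? with                                      -- operations = rows[-1]
    | none => none
    | some ops =>
      match opColsB rows.dropLast ops (length : Int) with         -- data = rows[:-1]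
      | none => none
      | some P =>
        (P.zip (P.drop 1 ++ [(length : Int)])).foldl
          (fun o pq => o.bind (fun t => (groupB rows.dropLast ops pq).map (t + ·)))
          (some 0)

def calculate_grand_total_alt (worksheet : String) : Int := (calcB worksheet).getD 0

-- ===== PRECONDITION & SPEC =====
def maxLenP : List (List Char) → Nat
  | [] => 0
  | h :: t => (t.map List.length).foldl max h.length

-- zip(*rows): one tuple per index j smaller than every row's length; the getD default is
-- never consulted there, so this is exact for zip over lists of chars
def pyZipStar (rows : List (List Char)) : List (List Char) :=
  let m := match rows.map List.length with
    | [] => 0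
    | h :: t => t.foldl min h
  (List.range m).map (fun j => rows.map (fun r => r.getD j ' '))

-- a column is fine iff, when its data part holds a number, int() parses it and the
-- operator slot is blank, '+' or '*'
def goodColB (col : List Char) : Bool :=
  let num := PySem.Chars.strip col.dropLast
  num = [] || ((PySem.Int.ofChars? num).isSome &&
    (PySem.Chars.strip [col.getLastD ' '] = [] || (col.getLastD ' ' == '+' || col.getLastD ' ' == '*')))

-- Pre_ = exactly the inputs where A returns normally: at least one line, and every column
-- with a non-blank data part parses as an int with a blank/'+'/'*' operator slot
-- (otherwise A raises ValueError / KeyError).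
def Pre_calculate_grand_total (worksheet : String) : Prop :=
  PySem.Str.splitlines worksheet ≠ [] ∧
  ((pyZipStar (((PySem.Str.splitlines worksheet).map String.toList).map
      (fun l => pyLjust l (maxLenP ((PySem.Str.splitlines worksheet).map String.toList))))).all
    goodColB) = true

instance (worksheet : String) : Decidable (Pre_calculate_grand_total worksheet) := by
  unfold Pre_calculate_grand_total; infer_instance

def pvWitness_calculate_grand_total : String := "12\n34\n+ "

def Spec_calculate_grand_total (worksheet : String) (out : Int) : Prop := out = calculate_grand_total_alt worksheet
instance (worksheet : String) (out : Int) : Decidable (Spec_calculate_grand_total worksheet out) := by unfold Spec_calculate_grand_total; infer_instance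

-- ===== CLAIM (what is proved, stated in full; the proofs are below) =====
def Claim_equal_calculate_grand_total : Prop := ∀ (worksheet : String), Dom_calculate_grand_total worksheet → Pre_calculate_grand_total worksheet → Spec_calculate_grand_total worksheet (calculate_grand_total worksheet)

-- ===== LEMMAS AND PROOFS =====

-- pure (exception-free) mirrors of the two programs, used only by the proofs
def opFun (c : Char) : Int → Int → Int := if c = '+' then (· + ·) else (· * ·)

def redC (c : Char) : List Int → Int
  | [] => 0
  | h :: t => t.foldl (opFun c) h

def flush2 (c : Char) (l : List Int) : Int := if c = '+' then l.sum else l.prod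

-- pure A loop body (right-to-left scan state = (operands, res))
def aStep (st : List Int × Int) (col : List Char) : List Int × Int :=
  let num := PySem.Chars.strip col.dropLast
  if num = [] then st
  else
    let n := (PySem.Int.ofChars? num).getD 0
    let operands := st.1 ++ [n]
    if PySem.Chars.strip [col.getLastD ' '] = [] then (operands, st.2)
    else ([], st.2 + redC (col.getLastD ' ') operands)

-- pure column readings
def numv? (col : List Char) : Option Int :=
  if PySem.Chars.strip col.dropLast = [] then none
  else some ((PySem.Int.ofChars? (PySem.Chars.strip col.dropLast)).getD 0)

def isOpc (col : List Char) : Bool :=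
  decide (PySem.Chars.strip [col.getLastD ' '] ≠ []) && (numv? col).isSome

-- (leading numbers before the first operator column, grand total), from the left
def ltState : List (List Char) → List Int × Int
  | [] => ([], 0)
  | c :: cs =>
    let p := ltState cs
    match numv? c with
    | none => p
    | some n =>
      if PySem.Chars.strip [c.getLastD ' '] = [] then (n :: p.1, p.2)
      else ([], p.2 + flush2 (c.getLastD ' ') (n :: p.1))

-- B's pure skeleton: operator positions, segment numbers, segment sum
def opPos : List (List Char) → List Nat
  | [] => []
  | c :: cs => (if isOpc c then [0] else []) ++ (opPos cs).map (· + 1)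

def numsIdx (cols : List (List Char)) (p q : Nat) : List Int :=
  ((List.range (q - p)).map (fun k => cols.getD (p + k) [])).filterMap numv?

def segSum (cols : List (List Char)) : Int :=
  (((opPos cols).zip ((opPos cols).drop 1 ++ [cols.length])).map
    (fun pq => flush2 ((cols.getD pq.1 []).getLastD ' ') (numsIdx cols pq.1 pq.2))).sum

theorem foldl_addf (t : List Int) (h : Int) : t.foldl (· + ·) h = h + t.sum := by
  induction t generalizing h with
  | nil => simp
  | cons x xs ih => simp [List.foldl_cons, ih, List.sum_cons]; ring

theorem foldl_mulf (t : List Int) (h : Int) : t.foldl (· * ·) h = h * t.prod := by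
  induction t generalizing h with
  | nil => simp
  | cons x xs ih => simp [List.foldl_cons, ih, List.prod_cons]; ring

theorem redC_eq (c : Char) (l : List Int) (hl : l ≠ []) :
    redC c l = flush2 c l := by
  cases l with
  | nil => exact absurd rfl hl
  | cons h t =>
    by_cases hc : c = '+'
    · simp [redC, flush2, hc, opFun, foldl_addf]
    · simp [redC, flush2, hc, opFun, foldl_mulf]

theorem pyReduce_opFun (c : Char) (l : List Int) (hl : l ≠ []) :
    pyReduce (opFun c) l = some (redC c l) := by
  cases l with
  | nil => exact absurd rfl hl
  | cons h t => rfl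

theorem pyGet?_in {α : Type} (l : List α) (d : α) (i : Int) (h0 : 0 ≤ i) (hi : i < l.length) :
    PySem.List.pyGet? l i = some (l.getD i.toNat d) := by
  have hlt : i.toNat < l.length := by omega
  simp [PySem.List.pyGet?, PySem.List.pyIdx?, h0, hi, List.getD, List.getElem?_eq_getElem hlt]

-- generic: an Option-threaded foldl whose step never fails is a pure foldl
theorem foldl_bind_some {σ α : Type} (f : σ → α → Option σ) (g : σ → α → σ)
    (l : List α) (hfg : ∀ c ∈ l, ∀ s', f s' c = some (g s' c)) :
    ∀ s : σ, l.foldl (fun o c => o.bind (fun st => f st c)) (some s) = some (l.foldl g s) := by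
  induction l with
  | nil => intro s; rfl
  | cons x xs ih =>
    intro s
    have hx := hfg x (by simp)
    simp only [List.foldl_cons, Option.bind_some, hx]
    exact ih (fun c hc => hfg c (by simp [hc])) _

-- Option-level column step equal to calcA_step once the index is resolved
def aStepO (col : List Char) (st : List Int × Int) : Option (List Int × Int) :=
  let num := PySem.Chars.strip col.dropLast
  if num = [] then some st
  else
    match PySem.Int.ofChars? num with
    | none => none
    | some n =>
      let operands := st.1 ++ [n]
      let ops := PySem.Chars.strip [col.getLastD ' ']
      if ops = [] then some (operands, st.2)
      else
        match PySem.Dict.get? opsDict (String.ofList ops) with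
        | none => none
        | some f =>
          match pyReduce f operands with
          | none => none
          | some r => some ([], st.2 + r)

theorem aStepO_good (col : List Char) (hg : goodColB col = true) (st : List Int × Int) :
    aStepO col st = some (aStep st col) := by
  unfold aStepO aStep goodColB at *
  by_cases hnum : PySem.Chars.strip col.dropLast = []
  · simp [hnum]
  · simp only [hnum, Bool.or_eq_true, Bool.and_eq_true, decide_eq_true_eq] at hg
    rcases hg with hg | ⟨hsome, hop⟩
    · exact (hnum (by simpa using hg)).elim
    · obtain ⟨n, hn⟩ := Option.isSome_iff_exists.mp hsome
      simp only [hnum, if_false, hn, Option.getD_some]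
      by_cases hops : PySem.Chars.strip [col.getLastD ' '] = []
      · simp only [List.getLastD_eq_getLast?] at hops
        simp [hops]
      · rcases hop with hop | hop
        · exact absurd hop hops
        · have hne : st.1 ++ [n] ≠ [] := by simp
          rcases hop with hop | hop
          · have hc : col.getLastD ' ' = '+' := of_decide_eq_true hop
            simp only [hc] at hops ⊢
            rw [show PySem.Chars.strip ['+'] = ['+'] from rfl]
            rw [if_neg (by simp : ¬(['+'] : List Char) = [])]
            rw [show PySem.Dict.get? opsDict (String.ofList ['+']) = some (opFun '+') from rfl]
            simp [pyReduce_opFun _ _ hne]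
          · have hc : col.getLastD ' ' = '*' := of_decide_eq_true hop
            simp only [hc] at hops ⊢
            rw [show PySem.Chars.strip ['*'] = ['*'] from rfl]
            rw [if_neg (by simp : ¬(['*'] : List Char) = [])]
            rw [show PySem.Dict.get? opsDict (String.ofList ['*']) = some (opFun '*') from rfl]
            simp [pyReduce_opFun _ _ hne]

-- A-side: resolving index i over rows of length len turns A's body into the column body
theorem mapM_pyGet (len : Nat) (i : Int) (h0 : 0 ≤ i) (hi : i < len) :
    ∀ data : List (List Char), (∀ r ∈ data, r.length = len) →
    data.mapM (fun l => PySem.List.pyGet? l i) = some (data.map (fun r => r.getD i.toNat ' ')) := by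
  intro data
  induction data with
  | nil => intro _; rfl
  | cons x xs ih =>
    intro h
    have hx : x.length = len := h x (by simp)
    rw [List.mapM_cons, pyGet?_in x ' ' i h0 (by rw [hx]; exact_mod_cast hi)]
    simp only [ih (fun r hr => h r (by simp [hr])), List.map_cons]
    rfl

theorem stepA_toCol (data : List (List Char)) (ops : List Char) (len : Nat)
    (hd : ∀ r ∈ data, r.length = len) (ho : ops.length = len)
    (i : Int) (h0 : 0 ≤ i) (hi : i < len) (st : List Int × Int) :
    calcA_step data ops st i = aStepO ((data ++ [ops]).map (fun r => r.getD i.toNat ' ')) st := by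
  unfold calcA_step aStepO
  rw [mapM_pyGet len i h0 hi data hd,
    pyGet?_in ops ' ' i h0 (by rw [ho]; exact_mod_cast hi)]
  simp only [List.map_append, List.map_cons, List.map_nil, List.dropLast_concat,
    List.getLastD_concat]

-- zip(*padded) over equal-length rows is the list of index columns
theorem pyZipStar_eq (rows : List (List Char)) (len : Nat) (hne : rows ≠ [])
    (hlen : ∀ r ∈ rows, r.length = len) :
    pyZipStar rows = (List.range len).map (fun j => rows.map (fun r => r.getD j ' ')) := by
  obtain ⟨x, xs, rfl⟩ := List.exists_cons_of_ne_nil hne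
  have hm : (match (x :: xs).map List.length with
      | [] => 0
      | h :: t => t.foldl min h) = len := by
    simp only [List.map_cons]
    have hx : x.length = len := hlen x (by simp)
    have : ∀ t : List (List Char), (∀ r ∈ t, r.length = len) →
        (t.map List.length).foldl min len = len := by
      intro t
      induction t with
      | nil => intro _; rfl
      | cons y ys ihy =>
        intro h
        simp only [List.map_cons, List.foldl_cons, h y (by simp), min_self]
        exact ihy (fun r hr => h r (by simp [hr]))
    rw [hx]
    exact this xs (fun r hr => hlen r (by simp [hr]))
  unfold pyZipStar
  rw [hm]

theorem flush2_rev_append (ch : Char) (n : Int) (l : List Int) :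
    flush2 ch (l.reverse ++ [n]) = flush2 ch (n :: l) := by
  by_cases hc : ch = '+'
  · simp [flush2, hc]; ring
  · simp [flush2, hc]; ring

theorem aStep_lt (cols : List (List Char)) :
    cols.foldr (fun c st => aStep st c) ([], 0) = ((ltState cols).1.reverse, (ltState cols).2) := by
  induction cols with
  | nil => rfl
  | cons c cs ih =>
    simp only [List.foldr_cons, ih, ltState, numv?]
    by_cases hnum : PySem.Chars.strip c.dropLast = []
    · simp [aStep, hnum]
    · simp only [aStep, hnum, if_neg hnum, if_false]
      split_ifs with h
      · simp
      · have hne : (ltState cs).1.reverse ++ [(PySem.Int.ofChars? (PySem.Chars.strip c.dropLast)).getD 0] ≠ [] := by simp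
        rw [redC_eq _ _ hne, flush2_rev_append]
        simp

-- === pure correspondence: B's segments = ltState ===
theorem numsIdx_shift (c : List Char) (cs : List (List Char)) (p q : Nat) :
    numsIdx (c :: cs) (p + 1) (q + 1) = numsIdx cs p q := by
  unfold numsIdx
  rw [Nat.succ_sub_succ]
  congr 1
  apply List.map_congr_left
  intro k _
  have : p + 1 + k = (p + k) + 1 := by omega
  rw [this, List.getD_cons_succ]

theorem map_getD_succ (c : List Char) (cs : List (List Char)) (q : Nat) :
    (List.range (q + 1)).map (fun k => (c :: cs).getD k []) =
      c :: (List.range q).map (fun k => cs.getD k []) := by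
  simp [List.range_succ_eq_map, List.map_map, Function.comp_def]

theorem numsIdx_zero_succ_none (c : List Char) (cs : List (List Char)) (q : Nat)
    (hn : numv? c = none) : numsIdx (c :: cs) 0 (q + 1) = numsIdx cs 0 q := by
  unfold numsIdx
  simp only [Nat.sub_zero, Nat.zero_add]
  rw [map_getD_succ]
  simp [List.filterMap_cons, hn]

theorem numsIdx_zero_succ_some (c : List Char) (cs : List (List Char)) (q : Nat) (n : Int)
    (hn : numv? c = some n) : numsIdx (c :: cs) 0 (q + 1) = n :: numsIdx cs 0 q := by
  unfold numsIdx
  simp only [Nat.sub_zero, Nat.zero_add]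
  rw [map_getD_succ]
  simp [List.filterMap_cons, hn]

theorem headD_map_succ (P : List Nat) (L : Nat) :
    ((P.map (· + 1)).headD (L + 1)) = P.headD L + 1 := by
  cases P <;> rfl

theorem ltState_none (c : List Char) (cs : List (List Char)) (hn : numv? c = none) :
    ltState (c :: cs) = ltState cs := by
  simp only [ltState, hn]

theorem ltState_app (c : List Char) (cs : List (List Char)) (n : Int) (hn : numv? c = some n)
    (hops : PySem.Chars.strip [c.getLastD ' '] = []) :
    ltState (c :: cs) = (n :: (ltState cs).1, (ltState cs).2) := by
  simp only [ltState, hn]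
  rw [if_pos hops]

theorem ltState_op (c : List Char) (cs : List (List Char)) (n : Int) (hn : numv? c = some n)
    (hops : ¬ PySem.Chars.strip [c.getLastD ' '] = []) :
    ltState (c :: cs) = ([], (ltState cs).2 + flush2 (c.getLastD ' ') (n :: (ltState cs).1)) := by
  simp only [ltState, hn]
  rw [if_neg hops]

theorem opPos_cons_t (c : List Char) (cs : List (List Char)) (h : isOpc c = true) :
    opPos (c :: cs) = 0 :: (opPos cs).map (· + 1) := by
  simp [opPos, h]

theorem opPos_cons_f (c : List Char) (cs : List (List Char)) (h : isOpc c = false) :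
    opPos (c :: cs) = (opPos cs).map (· + 1) := by
  simp [opPos, h]

theorem lead_eq (cs : List (List Char)) :
    (ltState cs).1 = numsIdx cs 0 ((opPos cs).headD cs.length) := by
  induction cs with
  | nil => rfl
  | cons c cs ih =>
    cases hn : numv? c with
    | none =>
      have hop : isOpc c = false := by simp [isOpc, hn]
      rw [ltState_none c cs hn, opPos_cons_f c cs hop, List.length_cons, headD_map_succ,
        numsIdx_zero_succ_none c cs _ hn, ih]
    | some n =>
      by_cases hops : PySem.Chars.strip [c.getLastD ' '] = []
      · have hop : isOpc c = false := by
          unfold isOpc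
          rw [hops]
          simp
        rw [ltState_app c cs n hn hops, opPos_cons_f c cs hop, List.length_cons, headD_map_succ,
          numsIdx_zero_succ_some c cs _ n hn, ih]
      · have hop : isOpc c = true := by
          unfold isOpc
          rw [hn]
          simp only [Option.isSome_some, Bool.and_true, decide_eq_true_eq]
          exact hops
        rw [ltState_op c cs n hn hops, opPos_cons_t c cs hop, List.headD_cons]
        simp [numsIdx]

theorem totZero (cs : List (List Char)) (h : opPos cs = []) : (ltState cs).2 = 0 := by
  induction cs with
  | nil => rfl
  | cons c cs ih =>
    simp only [opPos, List.append_eq_nil_iff, List.map_eq_nil_iff] at h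
    obtain ⟨h1, h2⟩ := h
    have hop : isOpc c = false := by
      by_contra hc
      simp [eq_true_of_ne_false hc] at h1
    cases hn : numv? c with
    | none => rw [ltState_none c cs hn]; exact ih h2
    | some n =>
      by_cases hops : PySem.Chars.strip [c.getLastD ' '] = []
      · rw [ltState_app c cs n hn hops]; exact ih h2
      · exfalso
        have hopt : isOpc c = true := by
          unfold isOpc
          rw [hn]
          simp only [Option.isSome_some, Bool.and_true, decide_eq_true_eq]
          exact hops
        rw [hopt] at hop
        exact Bool.noConfusion hop

theorem segSum_eq (cs : List (List Char)) : segSum cs = (ltState cs).2 := by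
  induction cs with
  | nil => rfl
  | cons c cs ih =>
    have htail : ∀ (X : List Nat) (Lb : Nat),
        ((X.map (· + 1)).zip ((X.map (· + 1)).drop 1 ++ [Lb + 1])).map
          (fun pq => flush2 (((c :: cs).getD pq.1 []).getLastD ' ') (numsIdx (c :: cs) pq.1 pq.2))
        = (X.zip (X.drop 1 ++ [Lb])).map
          (fun pq => flush2 ((cs.getD pq.1 []).getLastD ' ') (numsIdx cs pq.1 pq.2)) := by
      intro X Lb
      simp only [List.drop_one]
      rw [← List.map_tail, show ([Lb + 1] : List Nat) = [Lb].map (· + 1) from rfl,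
        ← List.map_append, List.zip_map, List.map_map]
      apply List.map_congr_left
      intro pq _
      obtain ⟨a, b⟩ := pq
      simp only [Function.comp_apply, Prod.map]
      rw [List.getD_cons_succ, numsIdx_shift]
    by_cases hop : isOpc c = true
    · obtain ⟨n, hn⟩ : ∃ n, numv? c = some n := by
        have h2 := hop
        simp only [isOpc, Bool.and_eq_true, decide_eq_true_eq] at h2
        exact Option.isSome_iff_exists.mp h2.2
      have hops : PySem.Chars.strip [c.getLastD ' '] ≠ [] := by
        have h2 := hop
        simp only [isOpc, Bool.and_eq_true, decide_eq_true_eq] at h2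
        exact h2.1
      rw [ltState_op c cs n hn hops]
      cases hP : opPos cs with
      | nil =>
        have hz := totZero cs hP
        have hld := lead_eq cs
        rw [hP, List.headD_nil] at hld
        unfold segSum
        rw [opPos_cons_t c cs hop, hP, List.map_nil]
        simp only [List.drop_one, List.tail_cons, List.nil_append, List.length_cons,
          List.zip_cons_cons, List.zip_nil_left, List.map_cons, List.map_nil, List.sum_cons,
          List.sum_nil, List.getD_cons_zero]
        rw [numsIdx_zero_succ_some c cs cs.length n hn, ← hld, hz]
        ring
      | cons p1 rest =>
        have hld := lead_eq cs
        rw [hP, List.headD_cons] at hld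
        unfold segSum
        rw [opPos_cons_t c cs hop, hP]
        simp only [List.map_cons, List.drop_one, List.tail_cons, List.length_cons,
          List.cons_append, List.zip_cons_cons, List.sum_cons, List.getD_cons_zero]
        have ht := htail (p1 :: rest) cs.length
        simp only [List.map_cons, List.drop_one, List.tail_cons] at ht
        rw [ht]
        rw [numsIdx_zero_succ_some c cs p1 n hn, ← hld]
        have hseg : segSum cs = (((p1 :: rest).zip ((p1 :: rest).drop 1 ++ [cs.length])).map
            (fun pq => flush2 ((cs.getD pq.1 []).getLastD ' ') (numsIdx cs pq.1 pq.2))).sum := by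
          unfold segSum
          rw [hP]
        rw [List.drop_one, List.tail_cons] at hseg
        rw [← hseg, ih]
        ring
    · have hop' : isOpc c = false := by simpa using hop
      have hlt2 : (ltState (c :: cs)).2 = (ltState cs).2 := by
        cases hn : numv? c with
        | none => rw [ltState_none c cs hn]
        | some n =>
          by_cases hops : PySem.Chars.strip [c.getLastD ' '] = []
          · rw [ltState_app c cs n hn hops]
          · exfalso
            have hopt : isOpc c = true := by
              unfold isOpc
              rw [hn]
              simp only [Option.isSome_some, Bool.and_true, decide_eq_true_eq]
              exact hops
            rw [hopt] at hop'
            exact Bool.noConfusion hop'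
      unfold segSum
      rw [opPos_cons_f c cs hop', List.length_cons, htail (opPos cs) cs.length, hlt2, ← ih]
      rfl

-- opPos as a filter over the index range
theorem opPos_filter (cols : List (List Char)) :
    opPos cols = (List.range cols.length).filter (fun k => isOpc (cols.getD k [])) := by
  induction cols with
  | nil => rfl
  | cons c cs ih =>
    simp only [opPos, List.length_cons, List.range_succ_eq_map, List.filter_cons,
      List.getD_cons_zero, List.filter_map]
    have : ((fun k => isOpc ((c :: cs).getD k [])) ∘ Nat.succ) = (fun k => isOpc (cs.getD k [])) := by
      funext k
      simp [List.getD_cons_succ]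
    rw [this, ← ih]
    cases h : isOpc c <;> simp [List.map_map, Nat.succ_eq_add_one, Function.comp_def]

theorem opPos_lt (cols : List (List Char)) : ∀ p ∈ opPos cols, p < cols.length := by
  rw [opPos_filter]
  intro p hp
  have := List.mem_range.mp (List.mem_of_mem_filter hp)
  exact this

theorem opPos_pairwise (cols : List (List Char)) : (opPos cols).Pairwise (· < ·) := by
  rw [opPos_filter]
  exact (List.pairwise_lt_range).filter _

-- pairs of zip(P, P[1:] + [L]) for a sorted P bounded by L
theorem zip_pairs (L : Nat) : ∀ (P : List Nat), P.Pairwise (· < ·) → (∀ x ∈ P, x < L) →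
    ∀ pq ∈ P.zip (P.drop 1 ++ [L]), pq.1 ∈ P ∧ pq.1 < pq.2 ∧ pq.2 ≤ L := by
  intro P
  induction P with
  | nil => intro _ _ pq hpq; simp at hpq
  | cons p rest ih =>
    intro hpw hlt pq hpq
    cases rest with
    | nil =>
      simp only [List.drop_one, List.tail_cons, List.nil_append, List.zip_cons_cons,
        List.zip_nil_left, List.mem_singleton] at hpq
      subst hpq
      exact ⟨by simp, hlt p (by simp), le_refl L⟩
    | cons p2 rs =>
      simp only [List.drop_one, List.tail_cons, List.cons_append, List.zip_cons_cons,
        List.mem_cons] at hpq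
      rcases hpq with rfl | hpq
      · refine ⟨by simp, ?_, ?_⟩
        · exact (List.pairwise_cons.mp hpw).1 p2 (by simp)
        · exact le_of_lt (hlt p2 (by simp))
      · have := ih (List.pairwise_cons.mp hpw).2 (fun x hx => hlt x (by simp [hx])) pq
          (by simpa [List.drop_one] using hpq)
        exact ⟨by simp [this.1], this.2⟩

-- append-collecting fold over an Option-valued reading is filterMap
def collectStep {α β : Type} (g : α → Option β) (acc : List β) (x : α) : List β :=
  match g x with
  | none => acc
  | some n => acc ++ [n]

theorem foldl_append_filterMap {α β : Type} (g : α → Option β) (l : List α) :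
    ∀ acc : List β, l.foldl (collectStep g) acc = acc ++ l.filterMap g := by
  induction l with
  | nil => intro acc; simp
  | cons x xs ih =>
    intro acc
    cases h : g x with
    | none => simp [List.foldl_cons, collectStep, h, ih, List.filterMap_cons]
    | some n => simp [List.foldl_cons, collectStep, h, ih, List.filterMap_cons]

-- ===== main theorem =====
set_option maxHeartbeats 1000000 in
theorem main_eq (w : String) (hpre : Pre_calculate_grand_total w) :
    calculate_grand_total w = calculate_grand_total_alt w := by
  obtain ⟨hne, hall⟩ := hpre
  set lines := (PySem.Str.splitlines w).map String.toList with hlines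
  have hlne : lines ≠ [] := by
    simp only [hlines, ne_eq, List.map_eq_nil_iff]; exact hne
  obtain ⟨l0, lt0, hl⟩ := List.exists_cons_of_ne_nil hlne
  set len := maxLenP lines with hlendef
  have hmax : PySem.List.max? (lines.map List.length) (fun n => n) = some len := by
    rw [hl]
    simp only [List.map_cons, PySem.List.max?_id_cons]
    rw [hlendef, hl]
    rfl
  have hub : ∀ l ∈ lines, l.length ≤ len := by
    intro l hlm
    exact PySem.List.max?_isMax hmax _ (List.mem_map_of_mem hlm)
  set padded := lines.map (fun l => pyLjust l len) with hpadded
  have hpl : ∀ r ∈ padded, r.length = len := by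
    intro r hr
    rw [hpadded] at hr
    obtain ⟨l, hlm, rfl⟩ := List.mem_map.mp hr
    have := hub l hlm
    simp [pyLjust]
    omega
  have hpne : padded ≠ [] := by
    rw [hpadded, hl]; simp
  set colAt := fun (j : Nat) => padded.map (fun r => r.getD j ' ') with hcolAt
  set cols := (List.range len).map colAt with hcols
  have hallcols : pyZipStar padded = cols := by
    rw [pyZipStar_eq padded len hpne hpl, hcols]
  rw [hallcols] at hall
  have hgood : ∀ c ∈ cols, goodColB c = true := fun c hc => List.all_eq_true.mp hall c hc
  have hgoodAt : ∀ k < len, goodColB (colAt k) = true := by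
    intro k hk
    exact hgood _ (List.mem_map_of_mem (List.mem_range.mpr hk))
  -- decompose padded as data ++ [operations]
  obtain ⟨ops, hops⟩ := Option.isSome_iff_exists.mp (List.getLast?_isSome.mpr hpne)
  set data := padded.dropLast with hdata
  have hsplit : data ++ [ops] = padded := by
    rw [hdata]
    have := List.dropLast_append_getLast? (l := padded)
    rw [hops] at this
    simpa using this
  have hdlen : ∀ r ∈ data, r.length = len := by
    intro r hr
    exact hpl r (by rw [← hsplit]; exact List.mem_append_left _ hr)
  have holen : ops.length = len := hpl ops (by rw [← hsplit]; simp)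
  have hcolAt_eq : ∀ j : Nat, colAt j = (data ++ [ops]).map (fun r => r.getD j ' ') := by
    intro j; rw [hsplit]
  have hcolLast : ∀ j : Nat, (colAt j).getLastD ' ' = ops.getD j ' ' := by
    intro j
    rw [hcolAt_eq]
    simp only [List.map_append, List.map_cons, List.map_nil, List.getLastD_concat]
  have hcolDrop : ∀ j : Nat, (colAt j).dropLast = data.map (fun r => r.getD j ' ') := by
    intro j
    rw [hcolAt_eq]
    simp only [List.map_append, List.map_cons, List.map_nil, List.dropLast_concat]
  have hgetD : ∀ k < len, cols.getD k [] = colAt k := by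
    intro k hk
    rw [hcols]
    rw [List.getD_eq_getElem?_getD, List.getElem?_map]
    simp [List.getElem?_range hk]
  have hcolslen : cols.length = len := by simp [hcols]
  clear_value lines len padded colAt cols data
  -- numAtB resolves to numv? on good in-range columns
  have hnumAt : ∀ k : Nat, k < len → numAtB data (k : Int) = some (numv? (colAt k)) := by
    intro k hk
    unfold numAtB
    rw [mapM_pyGet len (k : Int) (by positivity) (by exact_mod_cast hk) data hdlen]
    rw [show ((k : Int)).toNat = k from Int.toNat_natCast k]
    rw [← hcolDrop]
    by_cases hs : PySem.Chars.strip (colAt k).dropLast = []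
    · simp [hs, numv?]
    · have hg := hgoodAt k hk
      unfold goodColB at hg
      simp only [hs, Bool.or_eq_true, Bool.and_eq_true, decide_eq_true_eq] at hg
      rcases hg with hg | ⟨hsome, _⟩
      · exact absurd (by simpa using hg) hs
      · obtain ⟨n, hn⟩ := Option.isSome_iff_exists.mp hsome
        simp [hs, hn, numv?]
  -- ===== A side =====
  have hstepO : ∀ st : List Int × Int, ∀ i ∈ (PySem.List.pyRange 0 (len : Int) 1).reverse,
      calcA_step data ops st i = aStepO (colAt i.toNat) st := by
    intro st i hi
    rw [List.mem_reverse, PySem.List.mem_pyRange_one] at hi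
    rw [stepA_toCol data ops len hdlen holen i hi.1 (by exact_mod_cast hi.2) st, ← hcolAt_eq]
  have hAfold : calcA w = ((PySem.List.pyRange 0 (len : Int) 1).reverse.foldl
      (fun o i => o.bind (fun st => calcA_step data ops st i)) (some ([], 0))).map (·.2) := by
    simp only [calcA, ← hlines, hmax, ← hpadded, hops, PySem.List.slice?_none_none_neg_one,
      ← hdata]
  have hA2 : calcA w = (cols.reverse.foldl (fun o c => o.bind (fun st => aStepO c st))
      (some ([], 0))).map (·.2) := by
    rw [hAfold, PySem.List.foldl_congr_mem _ _
        (fun o i => o.bind (fun st => aStepO (colAt i.toNat) st)) _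
        (by intro acc x hx; cases acc with
            | none => rfl
            | some s => simp only [Option.bind_some]; exact hstepO s x hx)]
    have : cols.reverse = ((PySem.List.pyRange 0 (len : Int) 1).reverse).map (fun i => colAt i.toNat) := by
      rw [hcols, PySem.List.pyRange_one, ← List.map_reverse, ← List.map_reverse, List.map_map]
      simp [Function.comp_def]
    rw [this, List.foldl_map]
  have hApure : calcA w = some ((cols.reverse.foldl aStep ([], 0)).2) := by
    rw [hA2, foldl_bind_some (fun st c => aStepO c st) (fun st c => aStep st c) cols.reverse
      (fun c hc s' => aStepO_good c (hgood c (List.mem_reverse.mp hc)) s') ([], 0)]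
    rfl
  have hAval : calcA w = some ((ltState cols).2) := by
    rw [hApure, List.foldl_reverse]
    have := aStep_lt cols
    simp only [show (fun c (st : List Int × Int) => aStep st c) = (fun c st => aStep st c) from rfl] at this
    rw [show cols.foldr (fun c st => aStep st c) (([], 0) : List Int × Int)
        = ((ltState cols).1.reverse, (ltState cols).2) from this]
  -- ===== B side =====
  -- op_cols
  have hopstep : ∀ j ∈ PySem.List.pyRange 0 (len : Int) 1, ∀ acc : List Int,
      (match PySem.List.pyGet? ops j with
       | none => none
       | some c =>
         if PySem.Chars.strip [c] = [] then some acc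
         else match numAtB data j with
           | none => none
           | some none => some acc
           | some (some _) => some (acc ++ [j]))
      = some (if isOpc (colAt j.toNat) then acc ++ [j] else acc) := by
    intro j hj acc
    rw [PySem.List.mem_pyRange_one] at hj
    obtain ⟨k, rfl⟩ : ∃ k : Nat, j = (k : Int) := ⟨j.toNat, by omega⟩
    have hjlt : k < len := by exact_mod_cast hj.2
    rw [pyGet?_in ops ' ' (k : Int) (by positivity) (by rw [holen]; exact_mod_cast hj.2)]
    rw [Int.toNat_natCast]
    rw [show ops.getD k ' ' = (colAt k).getLastD ' ' from (hcolLast k).symm]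
    simp only []
    by_cases hb : PySem.Chars.strip [(colAt k).getLastD ' '] = []
    · rw [if_pos hb]
      have hopf : isOpc (colAt k) = false := by
        unfold isOpc
        rw [hb]
        simp
      rw [hopf]
      simp
    · rw [if_neg hb, hnumAt k hjlt]
      cases hn : numv? (colAt k) with
      | none =>
        have hopf : isOpc (colAt k) = false := by
          unfold isOpc
          rw [hn]
          simp
        rw [hopf]
        simp
      | some n =>
        have hopt : isOpc (colAt k) = true := by
          unfold isOpc
          rw [hn]
          simp only [Option.isSome_some, Bool.and_true, decide_eq_true_eq]
          exact hb
        rw [hopt]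
        simp
  have hOPeq : opPos cols = (List.range len).filter (fun k => isOpc (colAt k)) := by
    rw [opPos_filter, hcolslen]
    exact List.filter_congr (fun k hk => by rw [hgetD k (List.mem_range.mp hk)])
  have hopcols : opColsB data ops (len : Int) =
      some (((List.range len).filter (fun k => isOpc (colAt k))).map (Nat.cast : Nat → Int)) := by
    unfold opColsB
    rw [foldl_bind_some
      (fun acc j =>
        match PySem.List.pyGet? ops j with
        | none => none
        | some c =>
          if PySem.Chars.strip [c] = [] then some acc
          else match numAtB data j with
            | none => none
            | some none => some acc
            | some (some _) => some (acc ++ [j]))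
      (fun acc j => if isOpc (colAt j.toNat) then acc ++ [j] else acc)
      (PySem.List.pyRange 0 (len : Int) 1)
      (fun j hj acc => hopstep j hj acc) []]
    congr 1
    rw [PySem.List.pyRange_one]
    simp only [Int.sub_zero, Int.toNat_natCast, List.foldl_map, Int.zero_add]
    exact (PySem.List.foldl_append_if (fun k => isOpc (colAt k)) (Nat.cast : Nat → Int)
      (List.range len) []).trans (List.nil_append _)
  -- one segment
  have hgroup : ∀ p q : Nat, p < len → p < q → q ≤ len → isOpc (colAt p) = true →
      groupB data ops ((p : Int), (q : Int)) =
        some (flush2 ((colAt p).getLastD ' ') (numsIdx cols p q)) := by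
    intro p q hplen hpq hqlen hop
    unfold groupB
    have hnumstep : ∀ j ∈ PySem.List.pyRange (p : Int) (q : Int) 1, ∀ acc : List Int,
        (match numAtB data j with
         | none => none
         | some none => some acc
         | some (some n) => some (acc ++ [n]))
        = some (collectStep (fun j : Int => numv? (colAt j.toNat)) acc j) := by
      intro j hj acc
      rw [PySem.List.mem_pyRange_one] at hj
      obtain ⟨t, rfl⟩ : ∃ t : Nat, j = (t : Int) := ⟨j.toNat, by omega⟩
      have hjlt : t < len := by
        have h2 : (t : Int) < (q : Int) := hj.2
        have h3 : t < q := by exact_mod_cast h2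
        omega
      rw [hnumAt t hjlt]
      cases hn : numv? (colAt t) <;> simp [collectStep, Int.toNat_natCast, hn]
    rw [foldl_bind_some
      (fun acc j =>
        match numAtB data j with
        | none => none
        | some none => some acc
        | some (some n) => some (acc ++ [n]))
      (collectStep (fun j : Int => numv? (colAt j.toNat)))
      (PySem.List.pyRange (p : Int) (q : Int) 1)
      (fun j hj acc => hnumstep j hj acc) []]
    have hnums : (PySem.List.pyRange (p : Int) (q : Int) 1).foldl
        (collectStep (fun j : Int => numv? (colAt j.toNat))) []
        = numsIdx cols p q := by
      refine (foldl_append_filterMap (fun j : Int => numv? (colAt j.toNat))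
        (PySem.List.pyRange (p : Int) (q : Int) 1) []).trans ?_
      rw [PySem.List.pyRange_one]
      rw [show ((q : Int) - (p : Int)).toNat = q - p by omega]
      rw [List.filterMap_map]
      unfold numsIdx
      rw [List.filterMap_map]
      simp only [List.nil_append]
      apply List.filterMap_congr
      intro k hk
      have hklt : p + k < q := by
        have := List.mem_range.mp hk
        omega
      simp only [Function.comp_apply]
      rw [show ((p : Int) + (k : Nat) : Int).toNat = p + k by omega]
      rw [hgetD (p + k) (by omega)]
    rw [hnums]
    -- the gathered list starts with column p's number
    obtain ⟨n, hn⟩ : ∃ n, numv? (colAt p) = some n := by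
      simp only [isOpc, Bool.and_eq_true, decide_eq_true_eq] at hop
      exact Option.isSome_iff_exists.mp hop.2
    have hnumsne : numsIdx cols p q ≠ [] := by
      unfold numsIdx
      rw [show q - p = (q - p - 1) + 1 by omega, List.range_succ_eq_map]
      simp only [List.map_cons, Nat.add_zero, List.filterMap_cons]
      rw [hgetD p hplen, hn]
      simp
    rw [pyGet?_in ops ' ' (p : Int) (by positivity) (by rw [holen]; exact_mod_cast hplen)]
    rw [show ((p : Int)).toNat = p from Int.toNat_natCast p]
    rw [show ops.getD p ' ' = (colAt p).getLastD ' ' from (hcolLast p).symm]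
    -- the operator is '+' or '*' by goodness
    have hg := hgoodAt p hplen
    unfold goodColB at hg
    have hnumne : PySem.Chars.strip (colAt p).dropLast ≠ [] := by
      intro hcon
      rw [numv?, if_pos hcon] at hn
      simp at hn
    simp only [Bool.or_eq_true, Bool.and_eq_true, decide_eq_true_eq] at hg
    rcases hg with hg | ⟨_, hopk⟩
    · exact absurd (by simpa using hg) hnumne
    · have hops : PySem.Chars.strip [(colAt p).getLastD ' '] ≠ [] := by
        simp only [isOpc, Bool.and_eq_true, decide_eq_true_eq] at hop
        exact hop.1
      rcases hopk with hopk | hopk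
      · exact absurd hopk hops
      rcases hopk with hopk | hopk
      · have hc : (colAt p).getLastD ' ' = '+' := of_decide_eq_true hopk
        rw [hc]
        simp only []
        rw [show PySem.Dict.get? opsDict (String.ofList (PySem.Chars.strip ['+'])) = some (opFun '+') from rfl]
        simp only []
        rw [pyReduce_opFun _ _ hnumsne, redC_eq _ _ hnumsne]
      · have hc : (colAt p).getLastD ' ' = '*' := of_decide_eq_true hopk
        rw [hc]
        simp only []
        rw [show PySem.Dict.get? opsDict (String.ofList (PySem.Chars.strip ['*'])) = some (opFun '*') from rfl]
        simp only []
        rw [pyReduce_opFun _ _ hnumsne, redC_eq _ _ hnumsne]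
  -- the final fold over the pairs
  have hBfold : calcB w =
      match opColsB data ops (len : Int) with
      | none => none
      | some P =>
        (P.zip (P.drop 1 ++ [(len : Int)])).foldl
          (fun o pq => o.bind (fun t => (groupB data ops pq).map (t + ·))) (some 0) := by
    simp only [calcB, ← hlines, hmax, ← hpadded, hops, ← hdata]
  set P := opPos cols with hP
  have hPpw : P.Pairwise (· < ·) := opPos_pairwise cols
  have hPlt : ∀ x ∈ P, x < len := by
    intro x hx
    have := opPos_lt cols x hx
    rwa [hcolslen] at this
  have hzipmap : (P.map (Nat.cast : Nat → Int)).zip ((P.map (Nat.cast : Nat → Int)).drop 1 ++ [(len : Int)])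
      = (P.zip (P.drop 1 ++ [len])).map (fun pq => ((pq.1 : Int), (pq.2 : Int))) := by
    rw [List.drop_one, ← List.map_tail,
      show ([(len : Int)] : List Int) = ([len] : List Nat).map (Nat.cast : Nat → Int) from rfl,
      ← List.map_append, List.zip_map, List.drop_one]
    rfl
  have hpairstep : ∀ pq ∈ P.zip (P.drop 1 ++ [len]), ∀ t : Int,
      (groupB data ops ((pq.1 : Int), (pq.2 : Int))).map (t + ·)
      = some (t + flush2 ((colAt pq.1).getLastD ' ') (numsIdx cols pq.1 pq.2)) := by
    intro pq hpq t
    obtain ⟨hmem, hlt, hle⟩ := zip_pairs len P hPpw hPlt pq hpq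
    have hop : isOpc (colAt pq.1) = true := by
      have := hmem
      rw [hP, opPos_filter] at this
      have h2 := List.of_mem_filter this
      rwa [hgetD pq.1 (by rw [← hcolslen]; exact List.mem_range.mp (List.mem_of_mem_filter this))] at h2
    rw [hgroup pq.1 pq.2 (hPlt pq.1 hmem) hlt hle hop]
    rfl
  have hBval : calcB w = some (segSum cols) := by
    rw [hBfold, hopcols, ← hOPeq]
    simp only []
    rw [hzipmap]
    rw [List.foldl_map]
    rw [foldl_bind_some (fun t pq => (groupB data ops ((pq.1 : Int), (pq.2 : Int))).map (t + ·))
      (fun t pq => t + flush2 ((colAt pq.1).getLastD ' ') (numsIdx cols pq.1 pq.2)) _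
      (fun pq hpq t => hpairstep pq hpq t) 0]
    congr 1
    rw [PySem.List.foldl_add]
    unfold segSum
    rw [← hP, hcolslen]
    simp only [Int.zero_add]
    congr 1
    apply List.map_congr_left
    intro pq hpq
    obtain ⟨hmem, _, _⟩ := zip_pairs len P hPpw hPlt pq hpq
    rw [hgetD pq.1 (hPlt pq.1 hmem)]
  -- ===== combine =====
  unfold calculate_grand_total calculate_grand_total_alt
  rw [hAval, hBval, segSum_eq]

-- ===== VERDICT (by name: the statement is the Claim_ definition above) =====
theorem calculate_grand_total_spec : Claim_equal_calculate_grand_total := by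
  intro w _ hpre
  unfold Spec_calculate_grand_total
  exact main_eq w hpre
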